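-- pv_equiv track=rewrite | github.com/DenDiv/cpp_course | tree/test/test_data_gen.py | cnt_less
-- ===== SOURCE A (Python) =====
-- def cnt_less(val, l):
--     sort_l = list(sorted(l))
--     cnt = 0
--     for k in sort_l:
--         if val > k:
--             cnt += 1
--         else:
--             break
--     return cnt
-- ===== SOURCE B (Python) =====
-- def cnt_less(val, l):
--     return sum(1 for k in l if k < val)
-- ===== Notes on version B (the rewrite author's own statement) =====
-- stated objective: faster
-- what changed: Replaced sort-then-scan-prefix with a single linear pass counting elements below val (no sorting, no early-break loop).
import Mathlib
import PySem

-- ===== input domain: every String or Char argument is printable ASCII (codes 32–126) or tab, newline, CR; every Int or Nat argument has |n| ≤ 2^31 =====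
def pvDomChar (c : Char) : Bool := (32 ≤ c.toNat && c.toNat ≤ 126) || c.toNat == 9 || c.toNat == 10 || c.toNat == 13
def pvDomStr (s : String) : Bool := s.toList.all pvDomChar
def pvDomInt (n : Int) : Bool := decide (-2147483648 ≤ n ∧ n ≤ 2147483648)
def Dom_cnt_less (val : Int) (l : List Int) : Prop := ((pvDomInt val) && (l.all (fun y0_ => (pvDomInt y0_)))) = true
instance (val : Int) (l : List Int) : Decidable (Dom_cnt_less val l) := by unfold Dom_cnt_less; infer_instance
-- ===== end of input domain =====

-- B replaces A's sort + prefix scan with one linear counting pass; same return value everywhere.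

-- ===== PORT A =====
-- the 'for k in sort_l: if val > k: cnt += 1 else: break' loop, with its break
def cntLessLoopA (val : Int) : List Int → Int → Int
  | [], cnt => cnt
  | k :: rest, cnt => if val > k then cntLessLoopA val rest (cnt + 1) else cnt

def cnt_less (val : Int) (l : List Int) : Int :=
  let sort_l := PySem.List.sorted l (fun x => x) false
  cntLessLoopA val sort_l 0

-- ===== PORT B =====
def cnt_less_alt (val : Int) (l : List Int) : Int :=
  (l.countP (fun k => decide (k < val)) : Int)

-- ===== PRECONDITION & SPEC =====
def Spec_cnt_less (val : Int) (l : List Int) (out : Int) : Prop := out = cnt_less_alt val l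
instance (val : Int) (l : List Int) (out : Int) : Decidable (Spec_cnt_less val l out) := by unfold Spec_cnt_less; infer_instance

-- ===== CLAIM (what is proved, stated in full; the proofs are below) =====
def Claim_equal_cnt_less : Prop := ∀ (val : Int) (l : List Int), Dom_cnt_less val l → Spec_cnt_less val l (cnt_less val l)

-- ===== LEMMAS AND PROOFS =====

theorem cntLessLoopA_acc (val : Int) (xs : List Int) (c : Int) :
    cntLessLoopA val xs c = c + cntLessLoopA val xs 0 := by
  induction xs generalizing c with
  | nil => simp [cntLessLoopA]
  | cons k rest ih =>
    simp only [cntLessLoopA]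
    split_ifs with h
    · rw [ih (c + 1), ih (0 + 1)]; ring
    · ring

-- on a list sorted in nondecreasing order, the break-loop counts all elements < val
theorem cntLessLoopA_eq_countP (val : Int) (xs : List Int)
    (hs : xs.Pairwise (· ≤ ·)) :
    cntLessLoopA val xs 0 = (xs.countP (fun k => decide (k < val)) : Int) := by
  induction xs with
  | nil => simp [cntLessLoopA]
  | cons k rest ih =>
    rcases List.pairwise_cons.mp hs with ⟨hk, hrest⟩
    simp only [cntLessLoopA]
    split_ifs with h
    · rw [cntLessLoopA_acc, ih hrest, List.countP_cons]
      simp [show k < val from h]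
      ring
    · have : rest.countP (fun k => decide (k < val)) = 0 := by
        rw [List.countP_eq_zero]
        intro x hx
        simp only [decide_eq_true_eq]
        exact fun hlt => absurd (lt_of_le_of_lt (hk x hx) hlt) h
      rw [List.countP_cons, this]
      simp [show ¬ k < val from h]

-- ===== VERDICT (by name: the statement is the Claim_ definition above) =====
theorem cnt_less_spec : Claim_equal_cnt_less := by
  intro val l _
  unfold Spec_cnt_less cnt_less cnt_less_alt
  rw [cntLessLoopA_eq_countP val _ ?hs]
  · congr 1
    exact (PySem.List.sorted_perm l (fun x => x) false).countP_eq _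
  · have := PySem.List.sorted_pairwise (xs := l) (key := fun x : Int => x)
    simpa using this
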